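-- pv_equiv track=rewrite | github.com/barinsm/GeekBrains | hw04_normal.py | find_substr
-- ===== SOURCE A (Python) =====
-- def find_substr(string):
--     start_idx, end_idx = None, None
--     for idx, item in enumerate(string):
--         if start_idx == None:
--             if item.islower():
--                 start_idx = idx
--         else:
--             if item.isupper():
--                 end_idx = idx
--                 last_idx = idx + 1
--                 return string[start_idx:end_idx], last_idx
--     if end_idx == None:
--         return string[start_idx:], None
-- ===== SOURCE B (Python) =====
-- def find_substr(string):
--     # Eagerly index the string: collect all lowercase positions and all
--     # uppercase positions, then select the answer by pure arithmetic on
--     # those index lists (no early-exit scanning state machine).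
--     lowers = [i for i, c in enumerate(string) if c.islower()]
--     uppers = [i for i, c in enumerate(string) if c.isupper()]
--     if not lowers:
--         return string, None
--     a = lowers[0]
--     ups_after = [j for j in uppers if j > a]
--     if not ups_after:
--         return string[a:], None
--     j = ups_after[0]
--     return string[a:j], j + 1
-- ===== Notes on version B (the rewrite author's own statement) =====
-- stated objective: alternative
-- what changed: Replaced A's early-exit one-pass state machine with an eager indexing strategy: build the full lists of lowercase and uppercase positions, then pick the first lowercase index and the first uppercase index after it by arithmetic filtering of those lists.
import Mathlib
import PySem

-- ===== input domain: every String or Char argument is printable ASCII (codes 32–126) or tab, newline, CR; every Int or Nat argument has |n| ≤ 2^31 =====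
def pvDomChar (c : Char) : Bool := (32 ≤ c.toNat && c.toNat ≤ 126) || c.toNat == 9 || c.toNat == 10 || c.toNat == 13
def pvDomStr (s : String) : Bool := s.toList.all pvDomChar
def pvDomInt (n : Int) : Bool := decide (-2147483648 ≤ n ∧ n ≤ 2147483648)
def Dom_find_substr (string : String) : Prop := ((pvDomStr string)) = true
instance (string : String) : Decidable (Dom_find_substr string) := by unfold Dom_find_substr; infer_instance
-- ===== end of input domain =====

-- B replaces A's early-exit one-pass state machine by eager indexing: it builds the full
-- lists of lowercase and uppercase positions and selects the answer from those lists.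

-- ===== PORT A =====
-- A's enumerate loop with state start? (start_idx); end_idx matters only via the early return.
def find_substr_loopA (s : List Char) (rest : List Char) (idx : Nat) (start? : Option Nat) :
    String × Option Int :=
  match rest with
  | [] =>
    -- falls off the loop: end_idx is still None, return string[start_idx:], None
    (String.ofList (PySem.List.slice s (start?.map (Int.ofNat)) none), none)
  | c :: cs =>
    match start? with
    | none =>
      if PySem.Chars.islower c then find_substr_loopA s cs (idx + 1) (some idx)
      else find_substr_loopA s cs (idx + 1) none
    | some a =>
      if PySem.Chars.isupper c then
        (String.ofList (PySem.List.slice s (some (a : Int)) (some (idx : Int))), some ((idx : Int) + 1))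
      else find_substr_loopA s cs (idx + 1) (some a)

def find_substr (string : String) : String × Option Int :=
  find_substr_loopA string.toList string.toList 0 none

-- ===== PORT B =====
-- lowers/uppers: the comprehensions [i for i, c in enumerate(string) if c.islower()/isupper()]
def find_substr_alt (string : String) : String × Option Int :=
  let s := string.toList
  let lowers := ((PySem.List.enumerate s).filter (fun p => PySem.Chars.islower p.2)).map Prod.fst
  let uppers := ((PySem.List.enumerate s).filter (fun p => PySem.Chars.isupper p.2)).map Prod.fst
  match lowers.head? with
  | none => (string, none)
  | some a =>
    match (uppers.filter (fun j => a < j)).head? with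
    | none => (String.ofList (PySem.List.slice s (some a) none), none)
    | some j => (String.ofList (PySem.List.slice s (some a) (some j)), some (j + 1))

-- ===== PRECONDITION & SPEC =====
def Spec_find_substr (string : String) (out : String × Option Int) : Prop := out = find_substr_alt string
instance (string : String) (out : String × Option Int) : Decidable (Spec_find_substr string out) := by unfold Spec_find_substr; infer_instance

-- ===== CLAIM (what is proved, stated in full; the proofs are below) =====
def Claim_equal_find_substr : Prop := ∀ (string : String), Dom_find_substr string → Spec_find_substr string (find_substr string)

-- ===== LEMMAS AND PROOFS =====

-- proof-only helpers: the canonical two-phase reading both programs are reduced to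
def pvPhase1 (rest : List Char) (i : Nat) : Option Nat :=
  match rest with
  | [] => none
  | c :: cs => if PySem.Chars.islower c then some i else pvPhase1 cs (i + 1)

def pvPhase2 (rest : List Char) (j : Nat) : Option Nat :=
  match rest with
  | [] => none
  | c :: cs => if PySem.Chars.isupper c then some j else pvPhase2 cs (j + 1)

-- A's loop after the flag is set behaves like phase 2
theorem loopA_some (s : List Char) (rest : List Char) : ∀ (idx a : Nat),
    find_substr_loopA s rest idx (some a) =
      match pvPhase2 rest idx with
      | none => (String.ofList (s.drop a), none)
      | some j => (String.ofList ((s.drop a).take (j - a)), some ((j : Int) + 1)) := by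
  induction rest with
  | nil =>
    intro idx a
    simp [find_substr_loopA, pvPhase2, PySem.List.slice_from_natCast]
  | cons c cs ih =>
    intro idx a
    simp only [find_substr_loopA, pvPhase2]
    by_cases h : PySem.Chars.isupper c
    · simp [h, PySem.List.slice_natCast]
    · simp [h, ih]

-- A's loop in the flag-unset phase behaves like phase 1 followed by phase 2
theorem loopA_none (s : List Char) : ∀ (rest : List Char) (idx : Nat), s.drop idx = rest →
    find_substr_loopA s rest idx none =
      match pvPhase1 rest idx with
      | none => (String.ofList s, none)
      | some a =>
        match pvPhase2 (s.drop (a + 1)) (a + 1) with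
        | none => (String.ofList (s.drop a), none)
        | some j => (String.ofList ((s.drop a).take (j - a)), some ((j : Int) + 1)) := by
  intro rest
  induction rest with
  | nil =>
    intro idx _
    simp only [find_substr_loopA, pvPhase1, Option.map_none, PySem.List.slice_none_none]
  | cons c cs ih =>
    intro idx h
    have htail : s.drop (idx + 1) = cs := by
      simpa [List.tail_drop] using congrArg List.tail h
    simp only [find_substr_loopA, pvPhase1]
    by_cases hl : PySem.Chars.islower c
    · rw [if_pos hl, if_pos hl, loopA_some s cs (idx + 1) idx, ← htail]
    · simp only [hl, Bool.false_eq_true, if_false]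
      exact ih (idx + 1) htail

-- B's lowers.head? is phase 1 (generalized over the enumerate offset)
theorem lowers_head (rest : List Char) : ∀ (k : Nat),
    ((((PySem.List.enumerate rest (k : Int)).filter (fun p => PySem.Chars.islower p.2)).map Prod.fst).head?) =
      (pvPhase1 rest k).map (fun n => (n : Int)) := by
  induction rest with
  | nil => intro k; simp [PySem.List.enumerate_nil, pvPhase1]
  | cons c cs ih =>
    intro k
    rw [PySem.List.enumerate_cons]
    by_cases hl : PySem.Chars.islower c
    · simp [hl, pvPhase1]
    · have := ih (k + 1)
      simp only [List.filter_cons, hl, Bool.false_eq_true, if_false, pvPhase1]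
      rw [show ((k : Int) + 1) = ((k + 1 : Nat) : Int) by push_cast; ring] at *
      simpa [hl] using this

-- B's filtered uppers.head? is phase 2 from position a+1 (generalized over the offset)
theorem uppers_head (a : Nat) (rest : List Char) : ∀ (k : Nat),
    (((((PySem.List.enumerate rest (k : Int)).filter (fun p => PySem.Chars.isupper p.2)).map Prod.fst).filter
        (fun j => (a : Int) < j)).head?) =
      (if a < k then pvPhase2 rest k else pvPhase2 (rest.drop (a + 1 - k)) (a + 1)).map (fun n => (n : Int)) := by
  induction rest with
  | nil => intro k; simp [PySem.List.enumerate_nil, pvPhase2]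
  | cons c cs ih =>
    intro k
    rw [PySem.List.enumerate_cons]
    have ih' := ih (k + 1)
    rw [show ((k : Int) + 1) = ((k + 1 : Nat) : Int) by push_cast; ring] at *
    by_cases hk : a < k
    · by_cases hu : PySem.Chars.isupper c
      · simp [hu, hk, pvPhase2, show (a : Int) < (k : Int) from by exact_mod_cast hk]
      · have hk1 : a < k + 1 := by omega
        simp only [List.filter_cons, hu, Bool.false_eq_true, if_false]
        rw [ih']
        simp [hk, hk1, pvPhase2, hu]
    · -- k ≤ a: index k never passes the j > a filter
      have hkle : ¬ ((a : Int) < (k : Int)) := by exact_mod_cast hk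
      have hdrop : (c :: cs).drop (a + 1 - k) = cs.drop (a - k) := by
        have : a + 1 - k = (a - k) + 1 := by omega
        simp [this]
      by_cases hu : PySem.Chars.isupper c
      · simp only [List.filter_cons, hu, if_true, List.map_cons, List.filter_cons]
        rw [if_neg (by simpa using hkle), ih']
        by_cases hka : k = a
        · have h2 : a < k + 1 := by omega
          have h4 : a + 1 - k = 1 := by omega
          simp [h2, h4, hka]
        · have h2 : ¬ a < k + 1 := by omega
          have h3 : a + 1 - (k + 1) = a - k := by omega
          simp [hk, h2, h3, hdrop]
      · simp only [List.filter_cons, hu, Bool.false_eq_true, if_false]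
        rw [ih']
        by_cases hka : k = a
        · have h2 : a < k + 1 := by omega
          have h4 : a + 1 - k = 1 := by omega
          simp [h2, h4, hka, pvPhase2]
        · have h2 : ¬ a < k + 1 := by omega
          have h3 : a + 1 - (k + 1) = a - k := by omega
          simp [hk, h2, h3, hdrop]

theorem alt_eq_phases (string : String) :
    find_substr_alt string =
      match pvPhase1 string.toList 0 with
      | none => (string, none)
      | some a =>
        match pvPhase2 (string.toList.drop (a + 1)) (a + 1) with
        | none => (String.ofList (string.toList.drop a), none)
        | some j => (String.ofList ((string.toList.drop a).take (j - a)), some ((j : Int) + 1)) := by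
  simp only [find_substr_alt]
  rw [show (0 : Int) = ((0 : Nat) : Int) from rfl, lowers_head string.toList 0]
  cases h1 : pvPhase1 string.toList 0 with
  | none => simp
  | some a =>
    simp only [Option.map, Option.bind_some, Option.pure_def, Option.bind_eq_bind]
    rw [uppers_head a string.toList 0]
    have h0 : ¬ a < 0 := by omega
    rw [if_neg h0]
    cases h2 : pvPhase2 (string.toList.drop (a + 1 - 0)) (a + 1) with
    | none => simp [PySem.List.slice_from_natCast]
    | some j => simp [PySem.List.slice_natCast]

theorem find_substr_eq_alt (string : String) : find_substr string = find_substr_alt string := by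
  have hA := loopA_none string.toList string.toList 0 (by simp)
  unfold find_substr
  rw [hA, alt_eq_phases]
  cases h1 : pvPhase1 string.toList 0 <;> simp

-- ===== VERDICT (by name: the statement is the Claim_ definition above) =====
theorem find_substr_spec : Claim_equal_find_substr := by
  intro string _
  unfold Spec_find_substr
  exact find_substr_eq_alt string
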